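-- pv_equiv track=rewrite | github.com/ibrahimemohamed33/Comp_Ling_Final | phonology.py | phonetic_representation
-- ===== SOURCE A (Python) =====
-- import math
--
-- PHONE_LENGTH = 3
--
-- EMPTY_CHARACTER = "*"
--
-- def phonetic_representation(noun: str) -> str:
--     '''
--     Represents a string following a similar approach to the Wickelfeature. This
--     method essentially divides the string groups of PHONE_LENGTH syllables, and if the
--     word is not divisble by PHONE_LENGTH, it carries the needed phonemes over to the
--     remaining group. If the noun is smaller than PHONE_LENGTH, then it adds
--     the empty character to signify that it should be ignored.
--
--     EX (when PHONE_LENGTH = 3):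
--         i) Goose -> Goo | se -> Goo | ose
--         ii) Duck -> Duc | k -> Duc | uck
--         iii) Radius -> Rad | ius
--         iv) Octopus -> Oct | opu | pus
--     '''
--     length_noun = len(noun)
--     if length_noun < PHONE_LENGTH:
--         return (noun + (PHONE_LENGTH - length_noun) * EMPTY_CHARACTER)
--
--     last_phoneme_index = PHONE_LENGTH * math.floor(length_noun / PHONE_LENGTH)
--     representation = noun[: last_phoneme_index]
--     right_representation = noun[last_phoneme_index:]
--     deltaL = (PHONE_LENGTH - length_noun % PHONE_LENGTH) % PHONE_LENGTH
--
--     middle_representation = ''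
--     while deltaL > 0:
--         middle_representation += noun[last_phoneme_index - deltaL]
--         deltaL -= 1
--
--     return representation + middle_representation + right_representation
-- ===== SOURCE B (Python) =====
-- PHONE_LENGTH = 3
-- EMPTY_CHARACTER = "*"
--
-- def phonetic_representation(noun: str) -> str:
--     if len(noun) < PHONE_LENGTH:
--         return noun + EMPTY_CHARACTER * (PHONE_LENGTH - len(noun))
--     tail = noun[-PHONE_LENGTH:]
--     chunks = []
--     for i in range(0, len(noun), PHONE_LENGTH):
--         chunk = noun[i:i + PHONE_LENGTH]
--         chunks.append(chunk if len(chunk) == PHONE_LENGTH else tail)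
--     return ''.join(chunks)
-- ===== Notes on version B (the rewrite author's own statement) =====
-- stated objective: idiomatic
-- what changed: B precomputes the overlapping last-3-character tail once and builds the result by enumerating fixed-stride chunk starts with range(0, len, 3), substituting the tail for a short final chunk and joining, instead of A's floor/modulo index arithmetic plus a character-by-character carryover while-loop.
import Mathlib
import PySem

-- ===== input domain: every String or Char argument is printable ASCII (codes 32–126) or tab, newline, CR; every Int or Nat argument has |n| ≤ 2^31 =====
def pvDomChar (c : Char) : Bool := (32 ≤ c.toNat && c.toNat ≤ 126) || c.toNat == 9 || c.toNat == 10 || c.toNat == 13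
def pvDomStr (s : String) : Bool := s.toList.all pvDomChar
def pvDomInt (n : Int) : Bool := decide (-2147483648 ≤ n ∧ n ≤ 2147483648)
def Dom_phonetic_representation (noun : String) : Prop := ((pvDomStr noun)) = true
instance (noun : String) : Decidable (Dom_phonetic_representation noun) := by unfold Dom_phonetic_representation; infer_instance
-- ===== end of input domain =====

-- B precomputes the overlapping last-3 tail once and enumerates fixed-stride chunk starts
-- (range(0, len, 3)) with join, instead of A's floor/modulo index arithmetic plus a
-- character-by-character carryover while-loop (objective: idiomatic).

-- ===== PORT A =====
-- A's while-loop: middle_representation += noun[last_phoneme_index - deltaL]; deltaL -= 1.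
-- Python indexing noun[i] is ported as List.getD: on the branch that runs this loop the
-- index last - d is always in range (0 ≤ last - d < len), so the default is never used.
def pvMidLoop (l : List Char) (last : Nat) : Nat → List Char → List Char
  | 0, acc => acc
  | d + 1, acc => pvMidLoop l last d (acc ++ [l.getD (last - (d + 1)) '*'])

def phonetic_representation (noun : String) : String :=
  let l := noun.toList
  let lengthNoun := l.length
  if lengthNoun < 3 then
    -- noun + (PHONE_LENGTH - length_noun) * "*"
    String.ofList (l ++ List.replicate (3 - lengthNoun) '*')
  else
    -- PHONE_LENGTH * math.floor(length_noun / PHONE_LENGTH) = 3 * (n / 3) for n ≥ 0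
    let lastPhonemeIndex := 3 * (lengthNoun / 3)
    let representation := PySem.List.slice l none (some (lastPhonemeIndex : Int))
    let rightRepresentation := PySem.List.slice l (some (lastPhonemeIndex : Int)) none
    let deltaL := (3 - lengthNoun % 3) % 3
    String.ofList (representation ++ pvMidLoop l lastPhonemeIndex deltaL [] ++ rightRepresentation)

-- ===== PORT B =====
-- B's loop body: chunk = noun[i:i+3]; append chunk if it is full, else the precomputed tail.
def pvChunk (l tail : List Char) (i : Int) : List Char :=
  let chunk := PySem.List.slice l (some i) (some (i + 3))
  if chunk.length = 3 then chunk else tail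

def phonetic_representation_alt (noun : String) : String :=
  let l := noun.toList
  if l.length < 3 then
    String.ofList (l ++ List.replicate (3 - l.length) '*')
  else
    let tail := PySem.List.slice l (some (-3 : Int)) none  -- noun[-3:]
    -- for i in range(0, len(noun), 3): chunks.append(...)
    let chunks := (PySem.List.pyRange 0 (l.length : Int) 3).foldl
      (fun acc i => acc ++ [pvChunk l tail i]) []
    String.ofList (PySem.Chars.join [] chunks)  -- ''.join(chunks)

-- ===== PRECONDITION & SPEC =====
def Spec_phonetic_representation (noun : String) (out : String) : Prop := out = phonetic_representation_alt noun
instance (noun : String) (out : String) : Decidable (Spec_phonetic_representation noun out) := by unfold Spec_phonetic_representation; infer_instance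

-- ===== CLAIM (what is proved, stated in full; the proofs are below) =====
def Claim_equal_phonetic_representation : Prop := ∀ (noun : String), Dom_phonetic_representation noun → Spec_phonetic_representation noun (phonetic_representation noun)

-- ===== LEMMAS AND PROOFS =====

-- ''.join is plain concatenation.
theorem pvJoin_nil (l : List (List Char)) : PySem.Chars.join [] l = l.flatten := by
  show List.intercalate [] l = l.flatten
  induction l with
  | nil => rfl
  | cons x xs ih =>
      cases xs with
      | nil => simp [List.intercalate]
      | cons y ys =>
          simp [List.intercalate, List.intersperse] at *
          simpa [List.intercalate, List.intersperse] using ih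

-- a chunk at start 3*k is take 3 of drop 3*k, or the tail when short.
theorem pvChunk_eq (l tail : List Char) (k : Nat) :
    pvChunk l tail (3 * (k : Int)) =
      if ((l.drop (3 * k)).take 3).length = 3 then (l.drop (3 * k)).take 3 else tail := by
  have h1 : (3 * (k : Int)) = ((3 * k : Nat) : Int) := by push_cast; ring
  have h2 : (3 * (k : Int)) + 3 = ((3 * k : Nat) : Int) + ((3 : Nat) : Int) := by push_cast; ring
  unfold pvChunk
  rw [h2, h1, PySem.List.slice_natCast_add l (3 * k) 3]

-- B's chunk list, flattened, in closed form: the full chunks, then the tail iff the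
-- length is not a multiple of 3.
theorem pvChunks_flatten (tail : List Char) : ∀ (c : Nat) (l : List Char), c = (l.length + 2) / 3 →
    ((List.range c).map (fun k : Nat => pvChunk l tail (3 * (k : Int)))).flatten
      = l.take (3 * (l.length / 3)) ++ (if l.length % 3 = 0 then [] else tail) := by
  intro c
  induction c with
  | zero =>
      intro l hc
      have h0 : l = [] := List.length_eq_zero_iff.mp (by omega)
      subst h0
      simp
  | succ c ih =>
      intro l hc
      rw [List.range_succ_eq_map]
      simp only [List.map_cons, List.map_map, List.flatten_cons]
      by_cases h3 : 3 ≤ l.length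
      · have hhead : pvChunk l tail (3 * ((0 : Nat) : Int)) = l.take 3 := by
          rw [pvChunk_eq]
          simp [List.length_take, Nat.min_eq_left h3]
        have hshift : ∀ k : Nat,
            pvChunk l tail (3 * (((k + 1) : Nat) : Int)) = pvChunk (l.drop 3) tail (3 * (k : Int)) := by
          intro k
          rw [pvChunk_eq, pvChunk_eq]
          have : (l.drop 3).drop (3 * k) = l.drop (3 * (k + 1)) := by
            rw [List.drop_drop]
            congr 1
            omega
          rw [this]
        have htails : (List.map (fun k => pvChunk l tail (3 * (((k + 1) : Nat) : Int))) (List.range c)).flatten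
            = (l.drop 3).take (3 * ((l.drop 3).length / 3))
              ++ (if (l.drop 3).length % 3 = 0 then [] else tail) := by
          rw [List.map_congr_left (fun k _ => hshift k)]
          exact ih (l.drop 3) (by simp [List.length_drop]; omega)
        simp only [Function.comp_def, Nat.succ_eq_add_one]
        rw [hhead, htails, List.length_drop]
        have hq : 3 * (l.length / 3) = 3 + 3 * ((l.length - 3) / 3) := by omega
        have hr : l.length % 3 = (l.length - 3) % 3 := by omega
        rw [hq, hr, List.take_add, List.append_assoc]
      · -- 1 ≤ length ≤ 2: single short chunk, replaced by the tail
        have hn : l.length = 1 ∨ l.length = 2 := by omega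
        have hc0 : c = 0 := by omega
        have hhead : pvChunk l tail (3 * ((0 : Nat) : Int)) = tail := by
          rw [pvChunk_eq]
          rcases hn with h1 | h1 <;> simp [List.length_take, h1]
        have hhead' : pvChunk l tail 0 = tail := by simpa using hhead
        rcases hn with h1 | h1 <;>
          simp [hc0, hhead', h1]

-- A's middle loop followed by the right slice is exactly the overlapping last-3 tail
-- (or nothing when the length is a multiple of 3).
theorem pvMid_drop (l : List Char) (h3 : 3 ≤ l.length) :
    pvMidLoop l (3 * (l.length / 3)) ((3 - l.length % 3) % 3) [] ++ l.drop (3 * (l.length / 3))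
      = if l.length % 3 = 0 then l.drop (3 * (l.length / 3)) else l.drop (l.length - 3) := by
  have hr : l.length % 3 = 0 ∨ l.length % 3 = 1 ∨ l.length % 3 = 2 := by omega
  rcases hr with hr | hr | hr
  · simp [hr, pvMidLoop]
  · have hd : (3 - l.length % 3) % 3 = 2 := by omega
    have h1 : 3 * (l.length / 3) - 2 < l.length := by omega
    have h2 : 3 * (l.length / 3) - 1 < l.length := by omega
    rw [hd]
    simp only [pvMidLoop, List.nil_append, List.getD_eq_getElem l '*' h1,
      List.getD_eq_getElem l '*' h2]
    have e1 : l.drop (l.length - 3) = l[3 * (l.length / 3) - 2] :: l.drop (3 * (l.length / 3) - 1) := by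
      have := List.drop_eq_getElem_cons h1
      have heq : l.length - 3 = 3 * (l.length / 3) - 2 := by omega
      have heq2 : 3 * (l.length / 3) - 2 + 1 = 3 * (l.length / 3) - 1 := by omega
      rw [heq, this, heq2]
    have e2 : l.drop (3 * (l.length / 3) - 1) = l[3 * (l.length / 3) - 1] :: l.drop (3 * (l.length / 3)) := by
      have := List.drop_eq_getElem_cons h2
      have heq2 : 3 * (l.length / 3) - 1 + 1 = 3 * (l.length / 3) := by omega
      rw [this, heq2]
    simp [hr, e1, e2]
  · have hd : (3 - l.length % 3) % 3 = 1 := by omega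
    have h2 : 3 * (l.length / 3) - 1 < l.length := by omega
    rw [hd]
    simp only [pvMidLoop, List.nil_append, List.getD_eq_getElem l '*' h2]
    have e2 : l.drop (l.length - 3) = l[3 * (l.length / 3) - 1] :: l.drop (3 * (l.length / 3)) := by
      have := List.drop_eq_getElem_cons h2
      have heq : l.length - 3 = 3 * (l.length / 3) - 1 := by omega
      have heq2 : 3 * (l.length / 3) - 1 + 1 = 3 * (l.length / 3) := by omega
      rw [heq, this, heq2]
    simp [hr, e2]

-- ===== VERDICT (by name: the statement is the Claim_ definition above) =====
theorem phonetic_representation_spec : Claim_equal_phonetic_representation := by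
  intro noun _
  unfold Spec_phonetic_representation phonetic_representation phonetic_representation_alt
  set l := noun.toList with hl
  by_cases hlen : l.length < 3
  · simp [hlen]
  · have h3 : 3 ≤ l.length := by omega
    simp only [hlen, if_false]
    rw [PySem.List.foldl_append_singleton_eq_map, List.nil_append, pvJoin_nil,
        PySem.List.pyRange_of_pos 0 (l.length : Int) (by norm_num)]
    have hpos : (0 : Int) < (l.length : Int) := by exact_mod_cast (by omega : 0 < l.length)
    rw [if_pos hpos]
    have hcnt : (((l.length : Int) - 0 + 3 - 1) / 3).toNat = (l.length + 2) / 3 := by omega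
    rw [hcnt, List.map_map]
    have hfun : ((fun i => pvChunk l (PySem.List.slice l (some (-3)) none) i) ∘ fun k : Nat => (0 : Int) + 3 * (k : Int))
        = fun k : Nat => pvChunk l (PySem.List.slice l (some (-3)) none) (3 * (k : Int)) := by
      funext k
      simp
    rw [hfun, pvChunks_flatten _ _ l rfl,
        PySem.List.slice_to_natCast, PySem.List.slice_from_natCast,
        PySem.List.slice_from_neg_ofNat l 3 (by omega)]
    congr 1
    rw [List.append_assoc, pvMid_drop l h3]
    by_cases hr : l.length % 3 = 0
    · simp [hr]
      omega
    · simp [hr]
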